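-- pv_equiv track=rewrite | github.com/Sharjeel-Saleem-06/Github_Workflow_Automation | netlify-site/build_index.py | prefix_css_block
-- ===== SOURCE A (Python) =====
-- def prefix_css_block(css: str, pid: str) -> str:
--     lines = css.split("\n")
--     out = []
--     i = 0
--     n = len(lines)
--     while i < n:
--         line = lines[i]
--         s = line.strip()
--         if s.startswith("@keyframes"):
--             depth = 0
--             while i < n:
--                 ln = lines[i]
--                 out.append(ln)
--                 depth += ln.count("{") - ln.count("}")
--                 i += 1
--                 if depth <= 0:
--                     break
--             continue
--         if s.startswith(":root"):
--             depth = 0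
--             while i < n:
--                 ln = lines[i]
--                 out.append(ln)
--                 depth += ln.count("{") - ln.count("}")
--                 i += 1
--                 if depth <= 0:
--                     break
--             continue
--         if not s:
--             out.append(line)
--             i += 1
--             continue
--         if s.endswith("{"):
--             if s.startswith("@media"):
--                 out.append(line)
--                 i += 1
--                 continue
--             if s == "* {":
--                 out.append(line.replace("* {", f"{pid} * {{"))
--                 i += 1
--                 continue
--             if s == "body {":
--                 out.append(line.replace("body {", f"{pid} {{"))
--                 i += 1
--                 continue
--             if s == "html {":
--                 out.append(line.replace("html {", f"{pid} {{"))
--                 i += 1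
--                 continue
--             if s.startswith("defs "):
--                 out.append("    " + pid + " " + s)
--                 i += 1
--                 continue
--             sel = s[:-1].strip()
--             if "," in sel:
--                 parts = [p.strip() for p in sel.split(",")]
--                 fixed = ", ".join(pid + " " + p for p in parts)
--                 indent = line[: len(line) - len(line.lstrip())]
--                 out.append(indent + fixed + " {")
--             else:
--                 out.append(line.replace(sel + " {", pid + " " + sel + " {", 1))
--             i += 1
--             continue
--         out.append(line)
--         i += 1
--     return "\n".join(out)
-- ===== SOURCE B (Python) =====
-- def _protected_mask(lines):
--     """Pass 1: mark every line belonging to a @keyframes/:root block (incl. header)."""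
--     mask = []
--     depth = 0
--     active = False
--     for line in lines:
--         if not active:
--             s = line.strip()
--             if s.startswith("@keyframes") or s.startswith(":root"):
--                 active = True
--                 depth = 0
--         if active:
--             mask.append(True)
--             depth += line.count("{") - line.count("}")
--             if depth <= 0:
--                 active = False
--         else:
--             mask.append(False)
--     return mask
--
--
-- def _transform(line, pid):
--     """Pass 2 worker: rewrite one unprotected line's selector."""
--     s = line.strip()
--     if not s or not s.endswith("{") or s.startswith("@media"):
--         return line
--     if s == "* {":
--         return line.replace("* {", pid + " * {")
--     if s in ("body {", "html {"):
--         return line.replace(s, pid + " {")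
--     if s.startswith("defs "):
--         return "    " + pid + " " + s
--     sel = s[:-1].strip()
--     if "," in sel:
--         parts = [p.strip() for p in sel.split(",")]
--         fixed = ", ".join(pid + " " + p for p in parts)
--         indent = line[: len(line) - len(line.lstrip())]
--         return indent + fixed + " {"
--     return line.replace(sel + " {", pid + " " + sel + " {", 1)
--
--
-- def prefix_css_block(css: str, pid: str) -> str:
--     lines = css.split("\n")
--     return "\n".join(
--         line if prot else _transform(line, pid)
--         for line, prot in zip(lines, _protected_mask(lines))
--     )
-- ===== Notes on version B (the rewrite author's own statement) =====
-- stated objective: alternative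
-- what changed: Replaced A's single index-based while loop with nested inner block-copying loops by two staged passes: a first pass computes a boolean protection mask (which lines lie in a @keyframes/:root block), and a second pure per-line map rewrites each unprotected line and joins; A interleaves the two concerns in one control flow.
import Mathlib
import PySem

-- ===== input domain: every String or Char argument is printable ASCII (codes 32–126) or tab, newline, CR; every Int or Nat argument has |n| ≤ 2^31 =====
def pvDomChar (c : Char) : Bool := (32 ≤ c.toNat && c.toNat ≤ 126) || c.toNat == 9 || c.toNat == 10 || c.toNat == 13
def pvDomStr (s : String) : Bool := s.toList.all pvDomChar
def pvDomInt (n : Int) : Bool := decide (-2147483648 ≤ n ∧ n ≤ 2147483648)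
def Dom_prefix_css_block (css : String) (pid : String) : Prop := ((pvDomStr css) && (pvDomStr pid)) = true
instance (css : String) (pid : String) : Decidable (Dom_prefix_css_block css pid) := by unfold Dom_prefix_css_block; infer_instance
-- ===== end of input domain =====

-- B replaces A's single interleaved while loop (with nested inner block-copying loops)
-- by two staged passes: pass 1 computes a boolean protection mask over the lines,
-- pass 2 is a pure per-line map that rewrites each unprotected line (objective: alternative).

-- shared primitive: exact hand port of Python's str.replace(old, new, 1)
-- (first occurrence only; old = "" prepends new, as CPython does)
def pvReplace1 (cs old new : List Char) : List Char :=
  let i := PySem.Chars.find cs old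
  if i = -1 then cs else cs.take i.toNat ++ new ++ cs.drop (i.toNat + old.length)

-- shared primitive: ln.count("{") - ln.count("}") as an Int
def pvBal (ln : List Char) : Int :=
  (PySem.Chars.count ln ['{'] : Int) - (PySem.Chars.count ln ['}'] : Int)

-- ===== PORT A =====
-- A's inner `while` loop (append lines, track brace depth, break at depth ≤ 0 or end):
-- returns (appended lines, remaining lines)
def pvConsumeA (rest : List (List Char)) (depth : Int) : List (List Char) × List (List Char) :=
  match rest with
  | [] => ([], [])
  | ln :: rest' =>
    let d := depth + pvBal ln
    if d ≤ 0 then ([ln], rest')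
    else
      let p := pvConsumeA rest' d
      (ln :: p.1, p.2)

-- needed by pvGoA's termination; cited in decreasing_by
theorem pvConsumeA_len_le : ∀ (rest : List (List Char)) (d : Int),
    (pvConsumeA rest d).2.length ≤ rest.length := by
  intro rest
  induction rest with
  | nil => intro d; simp [pvConsumeA]
  | cons ln rest' ih =>
    intro d
    simp only [pvConsumeA]
    split
    · simp
    · exact Nat.le_trans (ih _) (Nat.le_succ _)

theorem pvConsumeA_len_lt (ln : List Char) (rest : List (List Char)) (d : Int) :
    ((pvConsumeA (ln :: rest) d).2).length < (ln :: rest).length := by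
  simp only [pvConsumeA]
  split
  · simp
  · exact Nat.lt_succ_of_le (pvConsumeA_len_le rest _)

-- A's outer `while i < n` loop
def pvGoA (pid : List Char) (lines : List (List Char)) : List (List Char) :=
  match h : lines with
  | [] => []
  | line :: rest =>
    let s := PySem.Chars.strip line
    if PySem.Chars.startswith s "@keyframes".toList then
      let p := pvConsumeA (line :: rest) 0
      p.1 ++ pvGoA pid p.2
    else if PySem.Chars.startswith s ":root".toList then
      let p := pvConsumeA (line :: rest) 0
      p.1 ++ pvGoA pid p.2
    else if s = [] then
      line :: pvGoA pid rest
    else if PySem.Chars.endswith s ['{'] then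
      (if PySem.Chars.startswith s "@media".toList then line
       else if s = "* {".toList then
         PySem.Chars.replace line "* {".toList (pid ++ " * {".toList)
       else if s = "body {".toList then
         PySem.Chars.replace line "body {".toList (pid ++ " {".toList)
       else if s = "html {".toList then
         PySem.Chars.replace line "html {".toList (pid ++ " {".toList)
       else if PySem.Chars.startswith s "defs ".toList then
         "    ".toList ++ pid ++ [' '] ++ s
       else
         let sel := PySem.Chars.strip (PySem.List.slice s none (some (-1)))
         if PySem.Chars.isIn [','] sel then
           let parts := (PySem.Chars.splitOn sel [',']).map PySem.Chars.strip
           let fixed := PySem.Chars.join ", ".toList (parts.map (fun p => pid ++ [' '] ++ p))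
           let indent := line.take (line.length - (PySem.Chars.lstrip line).length)
           indent ++ fixed ++ " {".toList
         else
           pvReplace1 line (sel ++ " {".toList) (pid ++ [' '] ++ sel ++ " {".toList)
      ) :: pvGoA pid rest
    else
      line :: pvGoA pid rest
termination_by lines.length
decreasing_by
  · exact h ▸ pvConsumeA_len_lt line rest 0
  · exact h ▸ pvConsumeA_len_lt line rest 0
  all_goals simp [h]

def prefix_css_block (css : String) (pid : String) : String :=
  String.mk (PySem.Chars.join ['\n'] (pvGoA pid.toList (PySem.Chars.splitOn css.toList ['\n'])))

-- ===== PORT B =====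
-- B pass 1: the protection mask (True on every line of a @keyframes/:root block)
def pvMask (lines : List (List Char)) (depth : Int) (active : Bool) : List Bool :=
  match lines with
  | [] => []
  | line :: rest =>
    let st :=
      if active then (true, depth)
      else
        let s := PySem.Chars.strip line
        if PySem.Chars.startswith s "@keyframes".toList ||
           PySem.Chars.startswith s ":root".toList then (true, (0 : Int))
        else (false, depth)
    if st.1 then
      let d := st.2 + pvBal line
      true :: pvMask rest d (decide (0 < d))
    else
      false :: pvMask rest depth false

-- B pass 2 worker: rewrite one unprotected line's selector
def pvTransform (pid line : List Char) : List Char :=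
  let s := PySem.Chars.strip line
  if s = [] || !PySem.Chars.endswith s ['{'] || PySem.Chars.startswith s "@media".toList then
    line
  else if s = "* {".toList then
    PySem.Chars.replace line "* {".toList (pid ++ " * {".toList)
  else if s = "body {".toList || s = "html {".toList then
    PySem.Chars.replace line s (pid ++ " {".toList)
  else if PySem.Chars.startswith s "defs ".toList then
    "    ".toList ++ pid ++ [' '] ++ s
  else
    let sel := PySem.Chars.strip (PySem.List.slice s none (some (-1)))
    if PySem.Chars.isIn [','] sel then
      let parts := (PySem.Chars.splitOn sel [',']).map PySem.Chars.strip
      let fixed := PySem.Chars.join ", ".toList (parts.map (fun p => pid ++ [' '] ++ p))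
      let indent := line.take (line.length - (PySem.Chars.lstrip line).length)
      indent ++ fixed ++ " {".toList
    else
      pvReplace1 line (sel ++ " {".toList) (pid ++ [' '] ++ sel ++ " {".toList)

def prefix_css_block_alt (css : String) (pid : String) : String :=
  let lines := PySem.Chars.splitOn css.toList ['\n']
  String.mk (PySem.Chars.join ['\n']
    (List.zipWith (fun line prot => if prot then line else pvTransform pid.toList line)
      lines (pvMask lines 0 false)))

-- ===== PRECONDITION & SPEC =====
def Spec_prefix_css_block (css : String) (pid : String) (out : String) : Prop := out = prefix_css_block_alt css pid
instance (css : String) (pid : String) (out : String) : Decidable (Spec_prefix_css_block css pid out) := by unfold Spec_prefix_css_block; infer_instance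

-- ===== CLAIM (what is proved, stated in full; the proofs are below) =====
def Claim_equal_prefix_css_block : Prop := ∀ (css : String) (pid : String), Dom_prefix_css_block css pid → Spec_prefix_css_block css pid (prefix_css_block css pid)

-- ===== LEMMAS AND PROOFS =====

-- combined loop invariant: outside a block pvGoA agrees with B's zipped mask+map (any depth,
-- active = false); inside a block, A's consume-then-continue equals it with active = true
theorem pvGo_main (pid : List Char) :
    ∀ (n : Nat) (rest : List (List Char)), rest.length ≤ n →
      (∀ d : Int, pvGoA pid rest =
        List.zipWith (fun line prot => if prot then line else pvTransform pid line)
          rest (pvMask rest d false)) ∧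
      (∀ d : Int, 0 < d →
        (pvConsumeA rest d).1 ++ pvGoA pid (pvConsumeA rest d).2 =
        List.zipWith (fun line prot => if prot then line else pvTransform pid line)
          rest (pvMask rest d true)) := by
  intro n
  induction n with
  | zero =>
    intro rest hlen
    have : rest = [] := List.length_eq_zero_iff.mp (Nat.le_zero.mp hlen)
    subst this
    constructor
    · intro d; simp [pvGoA, pvMask]
    · intro d _; simp [pvConsumeA, pvGoA, pvMask]
  | succ n ih =>
    intro rest hlen
    match rest with
    | [] =>
      constructor
      · intro d; simp [pvGoA, pvMask]
      · intro d _; simp [pvConsumeA, pvGoA, pvMask]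
    | line :: rest' =>
      have hr : rest'.length ≤ n := Nat.le_of_succ_le_succ hlen
      constructor
      · intro d
        rw [pvGoA]
        by_cases hkf : (PySem.Chars.startswith (PySem.Chars.strip line) "@keyframes".toList
            || PySem.Chars.startswith (PySem.Chars.strip line) ":root".toList) = true
        · -- block entry
          have hm : pvMask (line :: rest') d false =
              true :: pvMask rest' (pvBal line) (decide (0 < pvBal line)) := by
            simp only [pvMask]
            rw [if_neg (by simp : ¬ (false = true)), if_pos hkf]
            simp
          rw [hm]
          simp only [List.zipWith_cons_cons]
          have hblock : ∀ _ : Unit,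
              (pvConsumeA (line :: rest') 0).1 ++ pvGoA pid (pvConsumeA (line :: rest') 0).2 =
              line :: List.zipWith (fun line prot => if prot then line else pvTransform pid line)
                rest' (pvMask rest' (pvBal line) (decide (0 < pvBal line))) := by
            intro _
            simp only [pvConsumeA, Int.zero_add]
            by_cases hle : pvBal line ≤ 0
            · rw [if_pos hle]
              have hnot : decide (0 < pvBal line) = false := by
                simp [decide_eq_false_iff_not]; omega
              rw [hnot]
              simpa using (ih rest' hr).1 (pvBal line)
            · rw [if_neg hle]
              have hpos : (0 : Int) < pvBal line := by omega
              have hdec : decide (0 < pvBal line) = true := by simpa using hpos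
              rw [hdec]
              have := (ih rest' hr).2 (pvBal line) hpos
              simpa using this
          rcases Bool.or_eq_true_iff.mp hkf with h1 | h1
          · rw [if_pos h1]; exact hblock ()
          · by_cases h2 : PySem.Chars.startswith (PySem.Chars.strip line) "@keyframes".toList = true
            · rw [if_pos h2]; exact hblock ()
            · rw [if_neg h2, if_pos h1]; exact hblock ()
        · -- not a block entry
          have h1 : ¬ PySem.Chars.startswith (PySem.Chars.strip line) "@keyframes".toList = true := by
            intro h; exact hkf (Bool.or_eq_true_iff.mpr (Or.inl h))
          have h2 : ¬ PySem.Chars.startswith (PySem.Chars.strip line) ":root".toList = true := by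
            intro h; exact hkf (Bool.or_eq_true_iff.mpr (Or.inr h))
          rw [if_neg h1, if_neg h2]
          have hm : pvMask (line :: rest') d false = false :: pvMask rest' d false := by
            simp only [pvMask]
            rw [if_neg (by simp : ¬ (false = true)), if_neg hkf]
            simp
          rw [hm]
          simp only [List.zipWith_cons_cons]
          rw [if_neg (by simp : ¬ (false = true))]
          have htail := (ih rest' hr).1 d
          rw [htail]
          -- head: A's inline chain equals pvTransform
          simp only [pvTransform]
          by_cases hs : PySem.Chars.strip line = []
          · have hG : (decide (PySem.Chars.strip line = []) ||
                !PySem.Chars.endswith (PySem.Chars.strip line) ['{'] ||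
                PySem.Chars.startswith (PySem.Chars.strip line) "@media".toList) = true := by
              simp [hs]
            rw [if_pos hs, if_pos hG]
          · rw [if_neg hs]
            by_cases hend : PySem.Chars.endswith (PySem.Chars.strip line) ['{'] = true
            · rw [if_pos hend]
              by_cases hmed : PySem.Chars.startswith (PySem.Chars.strip line) "@media".toList = true
              · have hG : (decide (PySem.Chars.strip line = []) ||
                    !PySem.Chars.endswith (PySem.Chars.strip line) ['{'] ||
                    PySem.Chars.startswith (PySem.Chars.strip line) "@media".toList) = true := by
                  rw [Bool.or_eq_true]; exact Or.inr hmed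
                rw [if_pos hmed, if_pos hG]
              · have hG : ¬ (decide (PySem.Chars.strip line = []) ||
                    !PySem.Chars.endswith (PySem.Chars.strip line) ['{'] ||
                    PySem.Chars.startswith (PySem.Chars.strip line) "@media".toList) = true := by
                  simp only [Bool.or_eq_true, decide_eq_true_eq, Bool.not_eq_true']
                  push_neg
                  exact ⟨⟨hs, by simp [hend]⟩, hmed⟩
                rw [if_neg hmed, if_neg hG]
                by_cases hst : PySem.Chars.strip line = "* {".toList
                · rw [if_pos hst, if_pos hst]
                · rw [if_neg hst, if_neg hst]
                  by_cases hb : PySem.Chars.strip line = "body {".toList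
                  · have hBH : (decide (PySem.Chars.strip line = "body {".toList) ||
                        decide (PySem.Chars.strip line = "html {".toList)) = true := by
                      simp [hb]
                    rw [if_pos hb, if_pos hBH, hb]
                  · by_cases hh : PySem.Chars.strip line = "html {".toList
                    · have hBH : (decide (PySem.Chars.strip line = "body {".toList) ||
                          decide (PySem.Chars.strip line = "html {".toList)) = true := by
                        simp [hh]
                      rw [if_neg hb, if_pos hh, if_pos hBH, hh]
                    · have hBH : ¬ (decide (PySem.Chars.strip line = "body {".toList) ||
                          decide (PySem.Chars.strip line = "html {".toList)) = true := by
                        simp only [Bool.or_eq_true, decide_eq_true_eq]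
                        push_neg
                        exact ⟨hb, hh⟩
                      rw [if_neg hb, if_neg hh, if_neg hBH]
            · have hG : (decide (PySem.Chars.strip line = []) ||
                  !PySem.Chars.endswith (PySem.Chars.strip line) ['{'] ||
                  PySem.Chars.startswith (PySem.Chars.strip line) "@media".toList) = true := by
                have hef : PySem.Chars.endswith (PySem.Chars.strip line) ['{'] = false :=
                  Bool.eq_false_iff.mpr hend
                rw [Bool.or_eq_true, Bool.or_eq_true]
                exact Or.inl (Or.inr (by rw [hef]; rfl))
              rw [if_neg hend, if_pos hG]
      · -- consume invariant (inside a block: mask is true, zipWith keeps the raw line)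
        intro d hd
        have hm : pvMask (line :: rest') d true =
            true :: pvMask rest' (d + pvBal line) (decide (0 < d + pvBal line)) := by
          simp [pvMask]
        rw [hm]
        simp only [List.zipWith_cons_cons]
        simp only [pvConsumeA]
        by_cases hle : d + pvBal line ≤ 0
        · rw [if_pos hle]
          have hnot : decide (0 < d + pvBal line) = false := by
            simp [decide_eq_false_iff_not]; omega
          rw [hnot]
          simpa using (ih rest' hr).1 (d + pvBal line)
        · rw [if_neg hle]
          have hpos : (0 : Int) < d + pvBal line := by omega
          have hdec : decide (0 < d + pvBal line) = true := by simpa using hpos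
          rw [hdec]
          have := (ih rest' hr).2 (d + pvBal line) hpos
          simpa using this

-- ===== VERDICT (by name: the statement is the Claim_ definition above) =====
theorem prefix_css_block_spec : Claim_equal_prefix_css_block := by
  intro css pid _
  unfold Spec_prefix_css_block prefix_css_block prefix_css_block_alt
  have h := (pvGo_main pid.toList (PySem.Chars.splitOn css.toList ['\n']).length
      (PySem.Chars.splitOn css.toList ['\n']) le_rfl).1 0
  rw [h]
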